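-- pv_equiv track=rewrite | github.com/AndrewLishchenko/Main | labs109.py | maximum_difference_sublist
-- ===== SOURCE A (Python) =====
-- def maximum_difference_sublist(items, k = 2):
--     subSetValues={}
--     results=[]
--     for first in range(len(items)-k+1):
--         max,min=items[first],items[first]
--         for x in range(k): #Find max and min
--             if items[x+first]>max:
--                 max=items[x+first]
--             if items[x+first]<min:
--                 min=items[x+first]
--         subSetValues[first]=max-min
--         max,min=0,0
--     for best in subSetValues:#finding highest difference
--         if subSetValues[best]>max:
--             max=subSetValues[best]
--     for x in subSetValues.keys(): #where to start to get best/first substring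
--         if subSetValues[x]==max:
--             startVal=x
--             break
--     for x in range(k): #appending the best substring to results
--         results.append(items[x+startVal])
--     return(results)
-- ===== SOURCE B (Python) =====
-- def _push(items, q, h, x, sign):
--     # Monotonic-queue push: drop queued indices (behind the dead prefix q[:h])
--     # whose sign-adjusted value is not better than items[x]'s, then enqueue x.
--     while len(q) > h and sign * items[q[-1]] <= sign * items[x]:
--         q.pop()
--     q.append(x)
--
-- def maximum_difference_sublist(items, k=2):
--     n = len(items)
--     maxq, minq = [], []          # indices; active fronts at maxh / minh
--     maxh = minh = 0
--     best_start, best_range = 0, -1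
--     for i in range(n):
--         _push(items, maxq, maxh, i, 1)
--         _push(items, minq, minh, i, -1)
--         start = i - k + 1
--         if start >= 0:
--             if maxq[maxh] < start:
--                 maxh += 1
--             if minq[minh] < start:
--                 minh += 1
--             r = items[maxq[maxh]] - items[minq[minh]]
--             if r > best_range:
--                 best_range, best_start = r, start
--     return items[best_start:best_start + k]
-- ===== Notes on version B (the rewrite author's own statement) =====
-- stated objective: faster
-- what changed: B replaces A's per-window min/max rescan (and its dict/argmax passes) by a single left-to-right sweep with two monotonic index queues giving each window's max and min in amortized O(1), tracking the first window whose range strictly improves the best.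
import Mathlib
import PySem

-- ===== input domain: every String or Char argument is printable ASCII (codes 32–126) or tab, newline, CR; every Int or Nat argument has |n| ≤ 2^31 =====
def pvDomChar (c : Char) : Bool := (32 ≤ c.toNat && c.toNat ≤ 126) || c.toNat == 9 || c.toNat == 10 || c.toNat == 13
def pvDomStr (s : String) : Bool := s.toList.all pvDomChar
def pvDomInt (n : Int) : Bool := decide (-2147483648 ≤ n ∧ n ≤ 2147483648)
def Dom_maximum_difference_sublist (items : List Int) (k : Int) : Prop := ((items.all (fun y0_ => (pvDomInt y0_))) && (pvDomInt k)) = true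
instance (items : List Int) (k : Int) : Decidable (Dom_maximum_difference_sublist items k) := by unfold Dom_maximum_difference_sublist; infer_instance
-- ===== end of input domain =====

-- B replaces A's per-window min/max rescan (O(n*k)) by one sweep with two monotonic
-- index queues (sliding-window max/min in amortized O(1) per step, O(n) total),
-- tracking the first window whose range strictly improves the best; A = B on Pre_
-- (1 ≤ k ≤ len items).

-- ===== PORT A =====
-- Indexing is ported as pyGetD (default 0): on Pre_ every index A reads is provably in
-- range, so the default is never used; likewise the .getD 0 on find? (on Pre_ the dict
-- is nonempty and its maximum is attained, so startVal is always found).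
def maximum_difference_sublist (items : List Int) (k : Int) : List Int :=
  let subSetValues : PySem.Dict Int Int :=
    (PySem.List.pyRange 0 ((items.length : Int) - k + 1)).foldl
      (fun d first =>
        let mm : Int × Int :=
          (PySem.List.pyRange 0 k).foldl
            (fun p x =>
              (if PySem.List.pyGetD items (x + first) 0 > p.1 then PySem.List.pyGetD items (x + first) 0 else p.1,
               if PySem.List.pyGetD items (x + first) 0 < p.2 then PySem.List.pyGetD items (x + first) 0 else p.2))
            (PySem.List.pyGetD items first 0, PySem.List.pyGetD items first 0)
        d.insert first (mm.1 - mm.2))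
      PySem.Dict.empty
  let mx : Int := subSetValues.keys.foldl
      (fun m best => if subSetValues.getD best 0 > m then subSetValues.getD best 0 else m) 0
  let startVal : Int := (subSetValues.keys.find? (fun x => subSetValues.getD x 0 == mx)).getD 0
  (PySem.List.pyRange 0 k).foldl (fun res x => res ++ [PySem.List.pyGetD items (x + startVal) 0]) []

-- ===== PORT B =====
-- Source B's _push: pop queued indices behind the dead prefix (the first h slots) whose
-- sign-adjusted value is ≤ the new element's, then enqueue the new index.
def pvPushGo (items : List Int) (h : Nat) (sign x : Int) : Nat → List Int → List Int
  | 0, q => q ++ [x]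
  | n + 1, q =>
    if h < q.length ∧
        sign * PySem.List.pyGetD items (PySem.List.pyGetD q (-1) 0) 0 ≤ sign * PySem.List.pyGetD items x 0 then
      pvPushGo items h sign x n q.dropLast
    else q ++ [x]

def pvPush (items : List Int) (h : Nat) (sign x : Int) (q : List Int) : List Int :=
  pvPushGo items h sign x q.length q

-- the loop state: the two queues with their active-front positions and the best pair
structure PVState where
  maxq : List Int
  maxh : Nat
  minq : List Int
  minh : Nat
  bs : Int
  br : Int
deriving Repr, DecidableEq

-- one iteration of Source B's main loop (the .getD defaults are never used on Pre_)
def pvStep (items : List Int) (k : Int) (st : PVState) (i : Int) : PVState :=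
  let maxq := pvPush items st.maxh 1 i st.maxq
  let minq := pvPush items st.minh (-1) i st.minq
  let start := i - k + 1
  if 0 ≤ start then
    let maxh := if PySem.List.pyGetD maxq (st.maxh : Int) 0 < start then st.maxh + 1 else st.maxh
    let minh := if PySem.List.pyGetD minq (st.minh : Int) 0 < start then st.minh + 1 else st.minh
    let r := PySem.List.pyGetD items (PySem.List.pyGetD maxq (maxh : Int) 0) 0
           - PySem.List.pyGetD items (PySem.List.pyGetD minq (minh : Int) 0) 0
    if r > st.br then ⟨maxq, maxh, minq, minh, start, r⟩
    else ⟨maxq, maxh, minq, minh, st.bs, st.br⟩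
  else ⟨maxq, st.maxh, minq, st.minh, st.bs, st.br⟩

def maximum_difference_sublist_alt (items : List Int) (k : Int) : List Int :=
  let fin := (PySem.List.pyRange 0 (items.length : Int)).foldl (pvStep items k) ⟨[], 0, [], 0, 0, -1⟩
  PySem.List.slice items (some fin.bs) (some (fin.bs + k))

-- ===== PRECONDITION & SPEC =====
-- Pre_: exactly the inputs on which Python A returns normally: for k ≤ 0 its first loop
-- indexes items[len(items)] (IndexError); for k > len(items) the loop body never runs and
-- startVal is unbound (NameError).
def Pre_maximum_difference_sublist (items : List Int) (k : Int) : Prop :=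
  1 ≤ k ∧ k ≤ (items.length : Int)
instance (items : List Int) (k : Int) : Decidable (Pre_maximum_difference_sublist items k) := by
  unfold Pre_maximum_difference_sublist; infer_instance
def pvWitness_maximum_difference_sublist : List Int × Int := ([1, 5, 3], 2)

def Spec_maximum_difference_sublist (items : List Int) (k : Int) (out : List Int) : Prop := out = maximum_difference_sublist_alt items k
instance (items : List Int) (k : Int) (out : List Int) : Decidable (Spec_maximum_difference_sublist items k out) := by unfold Spec_maximum_difference_sublist; infer_instance

-- ===== CLAIM (what is proved, stated in full; the proofs are below) =====
def Claim_equal_maximum_difference_sublist : Prop := ∀ (items : List Int) (k : Int), Dom_maximum_difference_sublist items k → Pre_maximum_difference_sublist items k → Spec_maximum_difference_sublist items k (maximum_difference_sublist items k)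
-- ===== LEMMAS AND PROOFS =====

-- the window of length k starting at index i, and its range (the shared key)
def pvWnd (items : List Int) (k i : Int) : List Int := List.take k.toNat (List.drop i.toNat items)
def pvKey (w : List Int) : Int :=
  (PySem.List.max? w (fun y => y)).getD 0 - (PySem.List.min? w (fun y => y)).getD 0

lemma pvKey_nonneg (w : List Int) : 0 ≤ pvKey w := by
  cases w with
  | nil => simp [pvKey, PySem.List.max?, PySem.List.min?]
  | cons h t =>
    unfold pvKey
    rw [PySem.List.max?_id_cons, PySem.List.min?_id_cons]
    have h1 := (PySem.List.le_foldl_max t h).1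
    have h2 := (PySem.List.foldl_min_le t h).1
    simp only [Option.getD_some]
    omega

-- a loop 'for x in range(kk): acc = f(acc, items[x + first])' is a fold over the window
lemma pv_foldl_range_offset {β : Type} (items : List Int) (f : β → Int → β) (a : β)
    (first : Int) (kk : Nat) (h0 : 0 ≤ first) (h : first.toNat + kk ≤ items.length) :
    (PySem.List.pyRange 0 (kk : Int)).foldl
        (fun acc x => f acc (PySem.List.pyGetD items (x + first) 0)) a
      = (List.take kk (List.drop first.toNat items)).foldl f a := by
  induction kk with
  | zero =>
    rw [Nat.cast_zero, PySem.List.pyRange_one_eq_nil le_rfl]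
    simp
  | succ n ih =>
    have hcast : ((n + 1 : Nat) : Int) = (n : Int) + 1 := by push_cast; ring
    have hlt : first.toNat + n < items.length := by omega
    rw [hcast, PySem.List.pyRange_one_succ_right (by omega : (0:Int) ≤ (n : Int)),
        List.foldl_append, ih (by omega), List.take_add_one, List.foldl_append,
        List.getElem?_drop, List.getElem?_eq_getElem hlt]
    have hidx : (n : Int) + first = ((n + first.toNat : Nat) : Int) := by omega
    have hget : PySem.List.pyGetD items ((n : Int) + first) 0 = items[first.toNat + n] := by
      rw [hidx, PySem.List.pyGetD_natCast, List.getD_eq_getElem?_getD, Nat.add_comm,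
          List.getElem?_eq_getElem hlt]
      rfl
    simp [hget]

-- A's inner min/max loop computes pvKey of the window
lemma pv_inner_eq_key (items : List Int) (k first : Int) (hk : 1 ≤ k)
    (h0 : 0 ≤ first) (h : first.toNat + k.toNat ≤ items.length) :
    ((PySem.List.pyRange 0 k).foldl
        (fun p x =>
          (if PySem.List.pyGetD items (x + first) 0 > p.1 then PySem.List.pyGetD items (x + first) 0 else p.1,
           if PySem.List.pyGetD items (x + first) 0 < p.2 then PySem.List.pyGetD items (x + first) 0 else p.2))
        (PySem.List.pyGetD items first 0, PySem.List.pyGetD items first 0)).1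
      - ((PySem.List.pyRange 0 k).foldl
        (fun p x =>
          (if PySem.List.pyGetD items (x + first) 0 > p.1 then PySem.List.pyGetD items (x + first) 0 else p.1,
           if PySem.List.pyGetD items (x + first) 0 < p.2 then PySem.List.pyGetD items (x + first) 0 else p.2))
        (PySem.List.pyGetD items first 0, PySem.List.pyGetD items first 0)).2
      = pvKey (pvWnd items k first) := by
  have hF : first.toNat < items.length := by omega
  rw [PySem.List.foldl_prod_mk
      (f := fun m x => if PySem.List.pyGetD items (x + first) 0 > m then PySem.List.pyGetD items (x + first) 0 else m)
      (g := fun m x => if PySem.List.pyGetD items (x + first) 0 < m then PySem.List.pyGetD items (x + first) 0 else m)]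
  dsimp only
  have hmaxfold := pv_foldl_range_offset items (fun m v => if v > m then v else m)
      (PySem.List.pyGetD items first 0) first k.toNat h0 h
  have hminfold := pv_foldl_range_offset items (fun m v => if v < m then v else m)
      (PySem.List.pyGetD items first 0) first k.toNat h0 h
  simp only [] at hmaxfold hminfold
  have hkK : (( k.toNat : Nat) : Int) = k := by omega
  rw [hkK] at hmaxfold hminfold
  rw [hmaxfold, hminfold]
  have hw : List.take k.toNat (List.drop first.toNat items)
      = items[first.toNat] :: List.take (k.toNat - 1) (List.drop (first.toNat + 1) items) := by
    conv_lhs => rw [List.drop_eq_getElem_cons hF,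
      show k.toNat = (k.toNat - 1) + 1 from by omega, List.take_succ_cons]
  have hi0 : PySem.List.pyGetD items first 0 = items[first.toNat] := by
    conv_lhs => rw [show first = ((first.toNat : Nat) : Int) from by omega]
    rw [PySem.List.pyGetD_natCast, List.getD_eq_getElem?_getD, List.getElem?_eq_getElem hF]
    rfl
  unfold pvKey pvWnd
  rw [hw, PySem.List.max?_id_cons, PySem.List.min?_id_cons]
  simp only [Option.getD_some]
  rw [hi0, List.foldl_cons, List.foldl_cons, if_neg (lt_irrefl _)]
  rw [PySem.List.foldl_congr_mem _ (fun m v => if v > m then v else m) (fun m v => max m v) items[first.toNat]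
        (by intro acc x _
            dsimp only
            by_cases hlt : acc < x
            · rw [if_pos hlt, max_eq_right hlt.le]
            · rw [if_neg hlt, max_eq_left (not_lt.mp hlt)]),
      PySem.List.foldl_congr_mem _ (fun m v => if v < m then v else m) (fun m v => min m v) items[first.toNat]
        (by intro acc x _
            dsimp only
            by_cases hlt : x < acc
            · rw [if_pos hlt, min_eq_right hlt.le]
            · rw [if_neg hlt, min_eq_left (not_lt.mp hlt)])]

-- lookup in a dict built from keys paired with g
lemma pv_getD_mk_map (l : List Int) (g : Int → Int) (x : Int) (hx : x ∈ l) :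
    (PySem.Dict.mk (l.map (fun f => (f, g f)))).getD x 0 = g x := by
  induction l with
  | nil => cases hx
  | cons f t ih =>
    rw [List.map_cons]
    simp only [PySem.Dict.getD, PySem.Dict.get?_mk_cons]
    by_cases h : f = x
    · subst h; simp
    · rw [if_neg (by simpa using h)]
      have hx' : x ∈ t := by
        rcases List.mem_cons.mp hx with h' | h'
        · exact absurd h'.symm h
        · exact h'
      simpa [PySem.Dict.getD] using ih hx'

lemma pv_find?_congr {α : Type} (l : List α) (p q : α → Bool) (h : ∀ x ∈ l, p x = q x) :
    l.find? p = l.find? q := by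
  induction l with
  | nil => rfl
  | cons a t ih =>
    rw [List.find?_cons, List.find?_cons, h a (by simp)]
    cases hq : q a
    · exact ih (fun x hx => h x (by simp [hx]))
    · rfl

-- A's dict pipeline: building over distinct keys, then looking up, is the plain list scan
lemma pv_A_build (l : List Int) (vv gg : Int → Int) (hnd : l.Nodup)
    (hv : ∀ x ∈ l, vv x = gg x) :
    l.foldl (fun d first => d.insert first (vv first)) (PySem.Dict.empty : PySem.Dict Int Int)
      = PySem.Dict.mk (l.map (fun f => (f, gg f))) := by
  apply PySem.Dict.ext
  have h := PySem.Dict.items_foldl_insert_fresh l (fun a => a) vv PySem.Dict.empty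
      (fun a _ => rfl) (by simpa using hnd)
  simp only [] at h
  rw [h]
  show (l.map (fun a => (a, vv a))) = _
  exact List.map_congr_left (fun f hf => by rw [hv f hf])

lemma pv_A_tail (l : List Int) (gg : Int → Int) :
    (((PySem.Dict.mk (l.map (fun f => (f, gg f)))).keys.find? (fun x =>
        (PySem.Dict.mk (l.map (fun f => (f, gg f)))).getD x 0 ==
          (PySem.Dict.mk (l.map (fun f => (f, gg f)))).keys.foldl
            (fun m best => if (PySem.Dict.mk (l.map (fun f => (f, gg f)))).getD best 0 > m
              then (PySem.Dict.mk (l.map (fun f => (f, gg f)))).getD best 0 else m) 0)).getD 0)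
      = (l.find? (fun x => gg x == l.foldl (fun m best => if gg best > m then gg best else m) 0)).getD 0 := by
  have hkeys : (PySem.Dict.mk (l.map (fun f => (f, gg f)))).keys = l := by
    have hcomp : ((fun x : Int × Int => x.1) ∘ fun f : Int => (f, gg f)) = (fun f : Int => f) := rfl
    simp [PySem.Dict.keys, List.map_map, hcomp]
  rw [hkeys,
      PySem.List.foldl_congr_mem l _ (fun m best => if gg best > m then gg best else m) 0
        (fun acc x hx => by rw [pv_getD_mk_map l gg x hx]),
      pv_find?_congr l _ (fun x => gg x == l.foldl (fun m best => if gg best > m then gg best else m) 0)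
        (fun x hx => by rw [pv_getD_mk_map l gg x hx])]

-- the core: A's max-then-first-match scan picks the first-argmax index
lemma pv_argmax_first (g : Int → Int) (hg : ∀ x, 0 ≤ g x) : ∀ (m : Nat), 1 ≤ m →
    (g ((PySem.List.pyRange 1 (m : Int)).foldl (fun b x => if g b < g x then x else b) 0)
        = (PySem.List.pyRange 0 (m : Int)).foldl (fun a x => if g x > a then g x else a) 0)
    ∧ (0 ≤ (PySem.List.pyRange 1 (m : Int)).foldl (fun b x => if g b < g x then x else b) 0
        ∧ (PySem.List.pyRange 1 (m : Int)).foldl (fun b x => if g b < g x then x else b) 0 < (m : Int))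
    ∧ (PySem.List.pyRange 0 (m : Int)).find?
        (fun x => g x == (PySem.List.pyRange 0 (m : Int)).foldl (fun a x => if g x > a then g x else a) 0)
      = some ((PySem.List.pyRange 1 (m : Int)).foldl (fun b x => if g b < g x then x else b) 0) := by
  intro m
  induction m with
  | zero => intro h; omega
  | succ m ih =>
    intro _
    by_cases hm : m = 0
    · subst hm
      simp only [Nat.zero_add, Nat.cast_one]
      have hr01 : PySem.List.pyRange 0 (1 : Int) = [0] := by
        have h := PySem.List.pyRange_one_singleton 0
        norm_num at h
        exact h
      have hr11 : PySem.List.pyRange 1 (1 : Int) = [] :=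
        PySem.List.pyRange_one_eq_nil le_rfl
      rw [hr01, hr11]
      simp only [List.foldl_nil, List.foldl_cons]
      have h0 := hg 0
      have hM : (if g 0 > 0 then g 0 else 0) = g 0 := by split_ifs <;> omega
      refine ⟨by rw [hM], ⟨le_rfl, by norm_num⟩, ?_⟩
      rw [hM]
      simp [List.find?]
    · have hm1 : 1 ≤ m := by omega
      obtain ⟨ih1, ⟨ihR0, ihRm⟩, ih3⟩ := ih hm1
      have hcast : ((m + 1 : Nat) : Int) = (m : Int) + 1 := by push_cast; ring
      rw [hcast, PySem.List.pyRange_one_succ_right (by omega : (0:Int) ≤ (m : Int)),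
          PySem.List.pyRange_one_succ_right (by omega : (1:Int) ≤ (m : Int)),
          List.foldl_append, List.foldl_append]
      simp only [List.foldl_cons, List.foldl_nil]
      have hbound : ∀ x ∈ PySem.List.pyRange 0 (m : Int), g x ≤
          (PySem.List.pyRange 0 (m : Int)).foldl (fun a x => if g x > a then g x else a) 0 := by
        have hmaxform : (PySem.List.pyRange 0 (m : Int)).foldl (fun a x => if g x > a then g x else a) 0
            = (PySem.List.pyRange 0 (m : Int)).foldl (fun a x => max a (g x)) 0 := by
          refine PySem.List.foldl_congr_mem _ _ _ 0 ?_
          intro acc x _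
          dsimp only
          by_cases hlt : acc < g x
          · rw [if_pos hlt, max_eq_right hlt.le]
          · rw [if_neg hlt, max_eq_left (not_lt.mp hlt)]
        rw [hmaxform]
        exact (PySem.List.le_foldl_max_int _ g 0).2
      by_cases hcase : (PySem.List.pyRange 0 (m : Int)).foldl (fun a x => if g x > a then g x else a) 0 < g (m : Int)
      · have hgR : g ((PySem.List.pyRange 1 (m : Int)).foldl (fun b x => if g b < g x then x else b) 0) < g (m : Int) := by
          rw [ih1]; exact hcase
        rw [if_pos hgR, if_pos hcase]
        refine ⟨rfl, ⟨by omega, by omega⟩, ?_⟩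
        rw [List.find?_append]
        have hnone : (PySem.List.pyRange 0 (m : Int)).find? (fun x => g x == g (m : Int)) = none := by
          rw [List.find?_eq_none]
          intro x hx
          have := hbound x hx
          simp only [beq_iff_eq]
          omega
        rw [hnone]
        simp [List.find?]
      · have hgR : ¬ g ((PySem.List.pyRange 1 (m : Int)).foldl (fun b x => if g b < g x then x else b) 0) < g (m : Int) := by
          rw [ih1]; exact hcase
        rw [if_neg hgR, if_neg hcase]
        refine ⟨ih1, ⟨ihR0, by omega⟩, ?_⟩
        rw [List.find?_append, ih3]
        rfl

-- ===== B-side machinery: the monotonic-queue invariant =====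

-- sign-adjusted value read by the queues
def pvVal (items : List Int) (sign j : Int) : Int := sign * PySem.List.pyGetD items j 0
-- "index j survives through step i": every later element of the window is strictly smaller
def pvP (v : Int → Int) (i j : Int) : Bool := (PySem.List.pyRange (j+1) (i+1)).all (fun l => decide (v l < v j))
-- the active queue content after processing index i with window start s
def pvC (v : Int → Int) (s i : Int) : List Int := (PySem.List.pyRange s (i+1)).filter (pvP v i)
-- the running max of v over the window [s, i]
def pvWmax (v : Int → Int) (s i : Int) : Int := (PySem.List.pyRange (s+1) (i+1)).foldl (fun m j => max m (v j)) (v s)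
-- window range key and Source B's best-tracking step
def pvG (items : List Int) (k s : Int) : Int := pvKey (pvWnd items k s)
def pvBStep (items : List Int) (k : Int) (p : Int × Int) (x : Int) : Int × Int :=
  if pvG items k x > p.2 then (x, pvG items k x) else p

-- pvPush on 'dead prefix ++ active' pops exactly the too-small suffix of the active part
lemma pvPushGo_stop (items : List Int) (h : Nat) (sign x : Int) (n : Nat) (q : List Int)
    (hc : ¬ (h < q.length ∧
      sign * PySem.List.pyGetD items (PySem.List.pyGetD q (-1) 0) 0 ≤ sign * PySem.List.pyGetD items x 0)) :
    pvPushGo items h sign x n q = q ++ [x] := by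
  cases n with
  | zero => rfl
  | succ n => simp only [pvPushGo, if_neg hc]

lemma pvPush_spec (items : List Int) (sign x : Int) (t A : List Int) :
    pvPush items t.length sign x (t ++ A)
      = t ++ (A.rdropWhile (fun j => decide (sign * PySem.List.pyGetD items j 0 ≤ sign * PySem.List.pyGetD items x 0)) ++ [x]) := by
  unfold pvPush
  induction A using List.reverseRecOn with
  | nil =>
    rw [pvPushGo_stop]
    · simp
    · rintro ⟨h1, -⟩
      simp at h1
  | append_singleton as a ih =>
    have hlast : PySem.List.pyGetD (t ++ (as ++ [a])) (-1) (0:Int) = a := by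
      rw [← List.append_assoc]
      exact PySem.List.pyGetD_neg_one_append_singleton _ _ _
    have hlen : (t ++ (as ++ [a])).length = (t ++ as).length + 1 := by
      simp only [List.length_append, List.length_cons, List.length_nil]
      omega
    rw [hlen]
    by_cases hp : sign * PySem.List.pyGetD items a 0 ≤ sign * PySem.List.pyGetD items x 0
    · have hdl : (t ++ (as ++ [a])).dropLast = t ++ as := by
        rw [← List.append_assoc, List.dropLast_concat]
      simp only [pvPushGo]
      rw [if_pos ⟨by simp, by rw [hlast]; exact hp⟩, hdl, ih,
          List.rdropWhile_concat_pos _ _ _ (by simpa using hp)]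
    · rw [pvPushGo_stop, List.rdropWhile_concat_neg _ _ _ (by simpa using hp)]
      · simp
      · rintro ⟨-, h2⟩
        rw [hlast] at h2
        exact hp h2

-- the queue values are strictly decreasing along the active part
lemma pvC_pairwise (v : Int → Int) (s i : Int) :
    (pvC v s i).Pairwise (fun a b => v b < v a) := by
  refine ((PySem.List.pairwise_lt_pyRange_one s (i+1)).filter (pvP v i)).imp_of_mem ?_
  intro a b ha hb hab
  have hpa : pvP v i a = true := (List.mem_filter.mp ha).2
  have hbr := PySem.List.mem_pyRange_one.mp (List.mem_filter.mp hb).1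
  have hmem : b ∈ PySem.List.pyRange (a+1) (i+1) := PySem.List.mem_pyRange_one.mpr ⟨by omega, by omega⟩
  have := (List.all_eq_true.mp hpa) b hmem
  simpa using this

-- on a strictly-decreasing list, keeping the > t elements is dropping the ≤ t suffix
lemma pv_filter_eq_rdropWhile (v : Int → Int) (c : Int) (l : List Int)
    (hl : l.Pairwise (fun a b => v b < v a)) :
    l.filter (fun j => decide (c < v j)) = l.rdropWhile (fun j => decide (v j ≤ c)) := by
  induction l using List.reverseRecOn with
  | nil => simp
  | append_singleton as a ih =>
    obtain ⟨has, -, hrel⟩ := List.pairwise_append.mp hl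
    rw [List.filter_append]
    by_cases hp : v a ≤ c
    · rw [List.rdropWhile_concat_pos _ _ _ (by simpa using hp), ih has]
      have : List.filter (fun j => decide (c < v j)) [a] = [] := by
        simp
        omega
      rw [this, List.append_nil]
    · rw [List.rdropWhile_concat_neg _ _ _ (by simpa using hp)]
      have hall : as.filter (fun j => decide (c < v j)) = as :=
        List.filter_eq_self.mpr (fun y hy => by
          have := hrel y hy a (by simp)
          simp
          omega)
      have hone : List.filter (fun j => decide (c < v j)) [a] = [a] := by
        simp
        omega
      rw [hall, hone]

-- processing one more element: drop the dominated suffix, append the new index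
lemma pvC_succ (v : Int → Int) (s i : Int) (hs : s ≤ i + 1) :
    pvC v s (i + 1)
      = (pvC v s i).rdropWhile (fun j => decide (v j ≤ v (i+1))) ++ [i+1] := by
  unfold pvC
  rw [show (i + 1) + 1 = (i + 1) + 1 from rfl, PySem.List.pyRange_one_succ_right hs, List.filter_append]
  have hlast : List.filter (pvP v (i+1)) [i+1] = [i+1] := by
    simp [pvP, PySem.List.pyRange_one_eq_nil (le_refl (i+1+1))]
  rw [hlast]
  congr 1
  have hsplit : ∀ j ∈ PySem.List.pyRange s (i+1),
      pvP v (i+1) j = (decide (v (i+1) < v j) && pvP v i j) := by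
    intro j hj
    obtain ⟨hj1, hj2⟩ := PySem.List.mem_pyRange_one.mp hj
    unfold pvP
    rw [PySem.List.pyRange_one_succ_right (by omega : j + 1 ≤ i + 1), List.all_append]
    simp [Bool.and_comm]
  rw [List.filter_congr hsplit, ← List.filter_filter]
  exact pv_filter_eq_rdropWhile v (v (i+1)) (pvC v s i) (pvC_pairwise v s i)

lemma pv_mem_pvC (v : Int → Int) (s i x : Int) (h : x ∈ pvC v s i) : s ≤ x ∧ x ≤ i := by
  have := PySem.List.mem_pyRange_one.mp (List.mem_filter.mp h).1
  omega

lemma pv_self_mem_pvC (v : Int → Int) (s i : Int) (h : s ≤ i) : i ∈ pvC v s i := by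
  unfold pvC
  rw [List.mem_filter]
  refine ⟨PySem.List.mem_pyRange_one.mpr ⟨h, by omega⟩, ?_⟩
  unfold pvP
  rw [PySem.List.pyRange_one_eq_nil le_rfl]
  rfl

-- expiring the window start
lemma pvC_cons (v : Int → Int) (s i : Int) (h : s ≤ i) :
    pvC v s i = if pvP v i s then s :: pvC v (s+1) i else pvC v (s+1) i := by
  unfold pvC
  rw [PySem.List.pyRange_one_cons (by omega : s < i + 1), List.filter_cons]

lemma pv_foldl_max_le {l : List Int} {init c : Int} (h1 : init ≤ c) (h2 : ∀ x ∈ l, x ≤ c) :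
    l.foldl max init ≤ c := by
  induction l generalizing init with
  | nil => exact h1
  | cons a t ih =>
    rw [List.foldl_cons]
    exact ih (by have := h2 a (by simp); omega) (fun x hx => h2 x (by simp [hx]))

-- the front of the active queue carries the window maximum
lemma pv_head_pvC (v : Int → Int) (s i : Int) (h : s ≤ i) :
    ∃ hd tl, pvC v s i = hd :: tl ∧ v hd = pvWmax v s i ∧ s ≤ hd ∧ hd ≤ i := by
  obtain ⟨hd, tl, hC⟩ : ∃ hd tl, pvC v s i = hd :: tl := by
    cases hE : pvC v s i with
    | nil => exact absurd (pv_self_mem_pvC v s i h) (by rw [hE]; simp)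
    | cons a b => exact ⟨a, b, rfl⟩
  have hmem : hd ∈ pvC v s i := by rw [hC]; simp
  obtain ⟨hs1, hs2⟩ := pv_mem_pvC v s i hd hmem
  have hpair := pvC_pairwise v s i
  rw [hC, List.pairwise_cons] at hpair
  -- every surviving index is ≤ the front in value
  have hle_hd : ∀ x ∈ pvC v s i, v x ≤ v hd := by
    intro x hx
    rw [hC] at hx
    rcases List.mem_cons.mp hx with h' | h'
    · rw [h']
    · exact (hpair.1 x h').le
  -- every window index is ≤ the front in value
  have hall : ∀ m : Nat, ∀ j : Int, s ≤ j → j ≤ i → (i - j).toNat ≤ m → v j ≤ v hd := by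
    intro m
    induction m with
    | zero =>
      intro j hj1 hj2 hj3
      have hji : j = i := by omega
      rw [hji]
      exact hle_hd i (pv_self_mem_pvC v s i h)
    | succ m ih =>
      intro j hj1 hj2 hj3
      by_cases hpj : pvP v i j = true
      · exact hle_hd j (List.mem_filter.mpr ⟨PySem.List.mem_pyRange_one.mpr ⟨hj1, by omega⟩, hpj⟩)
      · have hex : ∃ l ∈ PySem.List.pyRange (j+1) (i+1), ¬ (v l < v j) := by
          by_contra hc
          push_neg at hc
          exact hpj (List.all_eq_true.mpr (fun l hl => by simpa using hc l hl))
        obtain ⟨l, hl, hvl⟩ := hex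
        obtain ⟨hl1, hl2⟩ := PySem.List.mem_pyRange_one.mp hl
        have := ih l (by omega) (by omega) (by omega)
        omega
  refine ⟨hd, tl, hC, le_antisymm ?_ ?_, hs1, hs2⟩
  · -- v hd ≤ pvWmax: hd is a window index
    unfold pvWmax
    rcases eq_or_lt_of_le hs1 with he | hlt
    · rw [← he]
      have := (PySem.List.le_foldl_max ((PySem.List.pyRange (s+1) (i+1)).map v) (v s)).1
      rw [List.foldl_map] at this
      exact this
    · have hmem' : hd ∈ PySem.List.pyRange (s+1) (i+1) := PySem.List.mem_pyRange_one.mpr ⟨by omega, by omega⟩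
      have := (PySem.List.le_foldl_max ((PySem.List.pyRange (s+1) (i+1)).map v) (v s)).2
        (v hd) (List.mem_map.mpr ⟨hd, hmem', rfl⟩)
      rw [List.foldl_map] at this
      exact this
  · -- pvWmax ≤ v hd
    unfold pvWmax
    have := pv_foldl_max_le (l := (PySem.List.pyRange (s+1) (i+1)).map v) (init := v s) (c := v hd)
      (hall (i - s).toNat s le_rfl h (by omega))
      (by
        intro x hx
        obtain ⟨j, hj, rfl⟩ := List.mem_map.mp hx
        obtain ⟨hj1, hj2⟩ := PySem.List.mem_pyRange_one.mp hj
        exact hall (i - j).toNat j (by omega) (by omega) le_rfl)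
    rw [List.foldl_map] at this
    exact this

-- fold of a pyRange-indexed read is the fold over the sliced window
lemma pv_foldl_pyRange_window {β : Type} (items : List Int) (f : β → Int → β) (a : β)
    (s : Int) (kk : Nat) (h0 : 0 ≤ s) (h : s.toNat + kk ≤ items.length) :
    (PySem.List.pyRange s (s + (kk : Int))).foldl (fun acc j => f acc (PySem.List.pyGetD items j 0)) a
      = (List.take kk (List.drop s.toNat items)).foldl f a := by
  induction kk with
  | zero =>
    rw [Nat.cast_zero, add_zero, PySem.List.pyRange_one_eq_nil le_rfl]
    simp
  | succ n ih =>
    have hcast : s + ((n + 1 : Nat) : Int) = (s + (n : Int)) + 1 := by push_cast; ring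
    have hlt : s.toNat + n < items.length := by omega
    rw [hcast, PySem.List.pyRange_one_succ_right (by omega : s ≤ s + (n : Int)),
        List.foldl_append, ih (by omega), List.take_add_one, List.foldl_append,
        List.getElem?_drop, List.getElem?_eq_getElem hlt]
    have hget : PySem.List.pyGetD items (s + (n : Int)) 0 = items[s.toNat + n] := by
      rw [show s + (n : Int) = ((s.toNat + n : Nat) : Int) from by omega,
          PySem.List.pyGetD_natCast, List.getD_eq_getElem?_getD, List.getElem?_eq_getElem hlt]
      rfl
    simp [hget]

lemma pv_foldl_max_neg (l : List Int) (a : Int) :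
    l.foldl (fun m x => max m ((-1) * x)) ((-1) * a) = -(l.foldl (fun m x => min m x) a) := by
  induction l generalizing a with
  | nil => simp
  | cons x t ih =>
    rw [List.foldl_cons, List.foldl_cons]
    have : max ((-1) * a) ((-1) * x) = (-1) * min a x := by
      simp only [neg_one_mul]
      rw [max_neg_neg]
    rw [this, ih]

-- the two front values add up to the window's range key
lemma pv_wmax_sum_eq_key (items : List Int) (k s : Int) (hk : 1 ≤ k) (hs : 0 ≤ s)
    (hb : s.toNat + k.toNat ≤ items.length) :
    pvWmax (pvVal items 1) s (s + k - 1) + pvWmax (pvVal items (-1)) s (s + k - 1)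
      = pvG items k s := by
  have hF : s.toNat < items.length := by omega
  have hw : List.take k.toNat (List.drop s.toNat items)
      = items[s.toNat] :: List.take (k.toNat - 1) (List.drop (s.toNat + 1) items) := by
    conv_lhs => rw [List.drop_eq_getElem_cons hF,
      show k.toNat = (k.toNat - 1) + 1 from by omega, List.take_succ_cons]
  have hi0 : PySem.List.pyGetD items s 0 = items[s.toNat] := by
    conv_lhs => rw [show s = ((s.toNat : Nat) : Int) from by omega]
    rw [PySem.List.pyGetD_natCast, List.getD_eq_getElem?_getD, List.getElem?_eq_getElem hF]
    rfl
  have hrest : List.take (k.toNat - 1) (List.drop (s+1).toNat items)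
      = List.take (k.toNat - 1) (List.drop (s.toNat + 1) items) := by
    have h1 : (s+1).toNat = s.toNat + 1 := by omega
    rw [h1]
  have hrange : s + k - 1 + 1 = (s + 1) + ((k.toNat - 1 : Nat) : Int) := by omega
  -- max side
  have hmax : pvWmax (pvVal items 1) s (s + k - 1)
      = (List.take (k.toNat - 1) (List.drop (s.toNat + 1) items)).foldl max items[s.toNat] := by
    unfold pvWmax
    simp only [pvVal]
    have hwin := pv_foldl_pyRange_window items (fun m x => max m (1 * x)) (1 * PySem.List.pyGetD items s 0)
      (s+1) (k.toNat - 1) (by omega) (by omega)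
    simp only [] at hwin
    rw [hrange, hwin, hrest, hi0, one_mul]
    exact PySem.List.foldl_congr_mem _ _ _ _ (fun acc x _ => by rw [one_mul])
  -- min side
  have hmin : pvWmax (pvVal items (-1)) s (s + k - 1)
      = -((List.take (k.toNat - 1) (List.drop (s.toNat + 1) items)).foldl min items[s.toNat]) := by
    unfold pvWmax
    simp only [pvVal]
    have hwin := pv_foldl_pyRange_window items (fun m x => max m ((-1) * x)) ((-1) * PySem.List.pyGetD items s 0)
      (s+1) (k.toNat - 1) (by omega) (by omega)
    simp only [] at hwin
    rw [hrange, hwin, hrest, pv_foldl_max_neg, hi0]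
  rw [hmax, hmin]
  unfold pvG pvKey pvWnd
  rw [hw, PySem.List.max?_id_cons, PySem.List.min?_id_cons]
  simp only [Option.getD_some]
  ring

-- reading the front of 'dead prefix ++ (hd :: tl)'
lemma pv_getD_front (t tl : List Int) (hd : Int) :
    PySem.List.pyGetD (t ++ hd :: tl) ((t.length : Nat) : Int) 0 = hd := by
  rw [PySem.List.pyGetD_natCast, List.getD_append_right _ _ _ _ le_rfl]
  simp

-- the master loop invariant of Source B's sweep
lemma pv_loop_inv (items : List Int) (k : Int) (hk1 : 1 ≤ k) :
    ∀ i : Nat, i ≤ items.length →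
    ∃ t u : List Int,
      ((PySem.List.pyRange 0 (i : Int)).foldl (pvStep items k) ⟨[], 0, [], 0, 0, -1⟩).maxq
          = t ++ pvC (pvVal items 1) (max 0 ((i : Int) - k)) ((i : Int) - 1)
      ∧ ((PySem.List.pyRange 0 (i : Int)).foldl (pvStep items k) ⟨[], 0, [], 0, 0, -1⟩).maxh = t.length
      ∧ ((PySem.List.pyRange 0 (i : Int)).foldl (pvStep items k) ⟨[], 0, [], 0, 0, -1⟩).minq
          = u ++ pvC (pvVal items (-1)) (max 0 ((i : Int) - k)) ((i : Int) - 1)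
      ∧ ((PySem.List.pyRange 0 (i : Int)).foldl (pvStep items k) ⟨[], 0, [], 0, 0, -1⟩).minh = u.length
      ∧ (((PySem.List.pyRange 0 (i : Int)).foldl (pvStep items k) ⟨[], 0, [], 0, 0, -1⟩).bs,
         ((PySem.List.pyRange 0 (i : Int)).foldl (pvStep items k) ⟨[], 0, [], 0, 0, -1⟩).br)
          = (PySem.List.pyRange 0 ((i : Int) - k + 1)).foldl (pvBStep items k) (0, -1) := by
  intro i
  induction i with
  | zero =>
    intro _
    have h0 : (PySem.List.pyRange 0 ((0 : Nat) : Int)) = [] := by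
      rw [Nat.cast_zero]
      exact PySem.List.pyRange_one_eq_nil le_rfl
    have hC0 : ∀ v : Int → Int, pvC v (max 0 (((0 : Nat) : Int) - k)) (((0 : Nat) : Int) - 1) = [] := by
      intro v
      unfold pvC
      rw [PySem.List.pyRange_one_eq_nil (by omega)]
      rfl
    have hB0 : (PySem.List.pyRange 0 (((0 : Nat) : Int) - k + 1)) = [] :=
      PySem.List.pyRange_one_eq_nil (by omega)
    refine ⟨[], [], ?_, ?_, ?_, ?_, ?_⟩ <;> rw [h0, List.foldl_nil]
    · rw [List.nil_append, hC0]
    · rfl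
    · rw [List.nil_append, hC0]
    · rfl
    · rw [hB0, List.foldl_nil]
  | succ i ih =>
    intro hle
    obtain ⟨t, u, hq1, hh1, hq2, hh2, hbest⟩ := ih (by omega)
    clear ih
    have hcast : ((i + 1 : Nat) : Int) = (i : Int) + 1 := by push_cast; ring
    have hstep : (PySem.List.pyRange 0 ((i + 1 : Nat) : Int)).foldl (pvStep items k) ⟨[], 0, [], 0, 0, -1⟩
        = pvStep items k ((PySem.List.pyRange 0 (i : Int)).foldl (pvStep items k) ⟨[], 0, [], 0, 0, -1⟩) (i : Int) := by
      rw [hcast, PySem.List.pyRange_one_succ_right (by omega : (0:Int) ≤ (i : Int)), List.foldl_append]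
      rfl
    set st := (PySem.List.pyRange 0 (i : Int)).foldl (pvStep items k) ⟨[], 0, [], 0, 0, -1⟩ with hst
    set sOld : Int := max 0 ((i : Int) - k) with hsOld
    have hsOld_le : sOld ≤ (i : Int) := by omega
    have hi1 : ((i + 1 : Nat) : Int) - 1 = (i : Int) := by omega
    -- the push step
    have hS1 := pvC_succ (pvVal items 1) sOld ((i : Int) - 1) (by omega)
    have hS2 := pvC_succ (pvVal items (-1)) sOld ((i : Int) - 1) (by omega)
    rw [show (i : Int) - 1 + 1 = (i : Int) from by ring] at hS1 hS2
    have hpush1 : pvPush items st.maxh 1 (i : Int) st.maxq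
        = t ++ pvC (pvVal items 1) sOld (i : Int) := by
      rw [hq1, hh1, pvPush_spec]
      exact congrArg (fun l => t ++ l) hS1.symm
    have hpush2 : pvPush items st.minh (-1) (i : Int) st.minq
        = u ++ pvC (pvVal items (-1)) sOld (i : Int) := by
      rw [hq2, hh2, pvPush_spec]
      exact congrArg (fun l => u ++ l) hS2.symm
    rw [hstep]
    simp only [pvStep]
    by_cases hstart : (0 : Int) ≤ (i : Int) - k + 1
    · -- a full window ends at i
      rw [if_pos hstart]
      set sNew : Int := (i : Int) - k + 1 with hsNew
      have hsplit : sNew = sOld ∨ sNew = sOld + 1 := by omega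
      have hsNew_le : sNew ≤ (i : Int) := by omega
      have hmaxNew : max 0 (((i + 1 : Nat) : Int) - k) = sNew := by omega
      have hsNew0 : (0 : Int) ≤ sNew := hstart
      have hswin : sNew + k - 1 = (i : Int) := by omega
      have hwinbound : sNew.toNat + k.toNat ≤ items.length := by omega
      -- the expiry step, generic over the value function
      have hexpire : ∀ (v : Int → Int) (w : List Int),
          ∃ w' : List Int,
            (if PySem.List.pyGetD (w ++ pvC v sOld (i : Int)) ((w.length : Nat) : Int) 0 < sNew
              then w.length + 1 else w.length) = w'.length
            ∧ w ++ pvC v sOld (i : Int) = w' ++ pvC v sNew (i : Int) := by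
        intro v w
        obtain ⟨hd, tl, hC, hv, hhd1, hhd2⟩ := pv_head_pvC v sOld (i : Int) hsOld_le
        rw [hC, pv_getD_front]
        by_cases hpop : hd < sNew
        · have hhd_eq : hd = sOld := by omega
          have hsN : sNew = sOld + 1 := by omega
          have htl : tl = pvC v sNew (i : Int) := by
            have hcons := pvC_cons v sOld (i : Int) hsOld_le
            by_cases hP : pvP v (i : Int) sOld = true
            · rw [if_pos hP, hC] at hcons
              rw [hsN]
              exact ((List.cons.injEq _ _ _ _).mp hcons).2
            · rw [if_neg hP, hC] at hcons
              have hmem2 : hd ∈ pvC v (sOld + 1) (i : Int) := by rw [← hcons]; simp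
              have := pv_mem_pvC v (sOld + 1) (i : Int) hd hmem2
              omega
          refine ⟨w ++ [hd], ?_, ?_⟩
          · rw [if_pos hpop]
            simp
          · rw [htl]
            simp
        · refine ⟨w, ?_, ?_⟩
          · rw [if_neg hpop]
          · rcases hsplit with hEq | hEq
            · rw [hEq, ← hC]
            · have hcons := pvC_cons v sOld (i : Int) hsOld_le
              by_cases hP : pvP v (i : Int) sOld = true
              · rw [if_pos hP, hC] at hcons
                have : hd = sOld := ((List.cons.injEq _ _ _ _).mp hcons).1
                omega
              · rw [if_neg hP, hC] at hcons
                rw [hEq, ← hcons]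
      obtain ⟨t', hT1, hT2⟩ := hexpire (pvVal items 1) t
      obtain ⟨u', hU1, hU2⟩ := hexpire (pvVal items (-1)) u
      obtain ⟨hd1, tl1, hC1, hv1, hb11, hb12⟩ := pv_head_pvC (pvVal items 1) sNew (i : Int) hsNew_le
      obtain ⟨hd2, tl2, hC2, hv2, hb21, hb22⟩ := pv_head_pvC (pvVal items (-1)) sNew (i : Int) hsNew_le
      have hrval : PySem.List.pyGetD items hd1 0 - PySem.List.pyGetD items hd2 0 = pvG items k sNew := by
        have h1 : PySem.List.pyGetD items hd1 0 = pvVal items 1 hd1 := by simp [pvVal]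
        have h2 : PySem.List.pyGetD items hd2 0 = -(pvVal items (-1) hd2) := by
          simp [pvVal]
        rw [h1, h2, hv1, hv2, sub_neg_eq_add]
        have hsum := pv_wmax_sum_eq_key items k sNew hk1 hsNew0 hwinbound
        rw [hswin] at hsum
        exact hsum
      rw [hpush1, hpush2, hh1, hh2, hT1, hU1, hT2, hU2, hmaxNew, hi1, hC1, hC2,
          pv_getD_front t' tl1 hd1, pv_getD_front u' tl2 hd2, hrval,
          hcast, show (i : Int) + 1 - k + 1 = sNew + 1 from by omega,
          PySem.List.pyRange_one_succ_right (by omega : (0:Int) ≤ sNew),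
          List.foldl_append, List.foldl_cons, List.foldl_nil, ← hbest]
      refine ⟨t', u', ?_, ?_, ?_, ?_, ?_⟩
      · split_ifs <;> rfl
      · split_ifs <;> rfl
      · split_ifs <;> rfl
      · split_ifs <;> rfl
      · show _ = if pvG items k sNew > st.br then (sNew, pvG items k sNew) else (st.bs, st.br)
        split_ifs with h <;> rfl
    · -- the window is not yet full
      rw [if_neg hstart]
      have hsame : max 0 (((i + 1 : Nat) : Int) - k) = sOld := by omega
      refine ⟨t, u, ?_, hh1, ?_, hh2, ?_⟩
      · rw [hi1, hsame]
        exact hpush1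
      · rw [hi1, hsame]
        exact hpush2
      · rw [hbest, PySem.List.pyRange_one_eq_nil (by omega : (i : Int) - k + 1 ≤ 0),
            PySem.List.pyRange_one_eq_nil (by omega : ((i + 1 : Nat) : Int) - k + 1 ≤ 0)]

-- Source B's best-tracking fold computes the first-argmax index and its key
lemma pv_bestfold (items : List Int) (k : Int) (l : List Int) (b0 : Int) :
    l.foldl (pvBStep items k) (b0, pvG items k b0)
      = (l.foldl (fun b x => if pvG items k b < pvG items k x then x else b) b0,
         pvG items k (l.foldl (fun b x => if pvG items k b < pvG items k x then x else b) b0)) := by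
  induction l generalizing b0 with
  | nil => rfl
  | cons a t ih =>
    rw [List.foldl_cons, List.foldl_cons]
    unfold pvBStep
    by_cases h : pvG items k b0 < pvG items k a
    · rw [if_pos (by omega : pvG items k a > pvG items k b0), if_pos h]
      exact ih a
    · rw [if_neg (by omega : ¬ pvG items k a > pvG items k b0), if_neg h]
      exact ih b0

-- ===== VERDICT (by name: the statement is the Claim_ definition above) =====
theorem maximum_difference_sublist_spec : Claim_equal_maximum_difference_sublist := by
  intro items k _ hpre
  obtain ⟨hk1, hkn⟩ := hpre
  have hk0 : ¬ k ≤ 0 := by omega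
  have hmI : (items.length : Int) - k + 1 = ((items.length - k.toNat + 1 : Nat) : Int) := by omega
  have hM1 : 1 ≤ items.length - k.toNat + 1 := by omega
  unfold Spec_maximum_difference_sublist
  set Mn : Nat := items.length - k.toNat + 1 with hMn
  have hcore := pv_argmax_first (pvG items k) (fun x => by unfold pvG; exact pvKey_nonneg _) Mn hM1
  obtain ⟨hc1, ⟨hcR0, hcRm⟩, hc3⟩ := hcore
  -- the shared first-argmax index
  set idx : Int := (PySem.List.pyRange 1 ((Mn : Nat) : Int)).foldl
      (fun b x => if pvG items k b < pvG items k x then x else b) 0 with hidx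
  -- ===== A's side: A = window at idx =====
  have hA : maximum_difference_sublist items k = pvWnd items k idx := by
    simp only [maximum_difference_sublist]
    rw [hmI]
    rw [pv_A_build (PySem.List.pyRange 0 ((Mn : Nat) : Int)) _ (pvG items k)
        (PySem.List.nodup_pyRange_one _ _)
        (fun f hf => by
          obtain ⟨hf0, hfm⟩ := PySem.List.mem_pyRange_one.mp hf
          simpa [pvG] using pv_inner_eq_key items k f hk1 hf0 (by omega))]
    rw [pv_A_tail (PySem.List.pyRange 0 ((Mn : Nat) : Int)) (pvG items k)]
    rw [hc3]
    simp only [Option.getD_some]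
    have hfin := pv_foldl_range_offset items (fun acc v => acc ++ [v]) ([] : List Int)
        idx k.toNat hcR0 (by omega)
    rw [show ((k.toNat : Nat) : Int) = k from by omega] at hfin
    rw [hfin, PySem.List.foldl_append_singleton_eq_self, List.nil_append]
    rfl
  -- ===== B's side: B = window at idx =====
  have hB : maximum_difference_sublist_alt items k = pvWnd items k idx := by
    simp only [maximum_difference_sublist_alt]
    obtain ⟨t, u, -, -, -, -, hbest⟩ := pv_loop_inv items k hk1 items.length le_rfl
    have hMcast : ((items.length : Nat) : Int) - k + 1 = ((Mn : Nat) : Int) := by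
      rw [hMn]; omega
    rw [hMcast] at hbest
    have hsplitR : PySem.List.pyRange 0 ((Mn : Nat) : Int)
        = 0 :: PySem.List.pyRange 1 ((Mn : Nat) : Int) := by
      rw [PySem.List.pyRange_one_cons (by omega : (0:Int) < ((Mn : Nat) : Int))]
      norm_num
    have hfirst : pvBStep items k (0, -1) 0 = (0, pvG items k 0) := by
      unfold pvBStep
      rw [if_pos (by have := pvKey_nonneg (pvWnd items k 0); unfold pvG; omega)]
    rw [hsplitR, List.foldl_cons, hfirst, pv_bestfold] at hbest
    have hbs : ((PySem.List.pyRange 0 ((items.length : Nat) : Int)).foldl (pvStep items k) ⟨[], 0, [], 0, 0, -1⟩).bs = idx := by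
      have := congrArg Prod.fst hbest
      simpa using this
    rw [hbs, PySem.List.slice_toNat items hcR0 (by omega)]
    unfold pvWnd
    congr 1
    omega
  rw [hA, hB]
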